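-- pv_equiv track=rewrite | github.com/wazuhpoc083-alt/pci-scope | backend/app/parsers/fortinet.py | _resolve_service
-- ===== SOURCE A (Python) =====
-- from typing import Any
--
-- _BUILTIN_SERVICES: dict[str, list[str]] = {
--     "ALL": ["ALL"],
--     "ANY": ["ALL"],
--     "HTTP": ["tcp/80"],
--     "HTTPS": ["tcp/443"],
--     "SSH": ["tcp/22"],
--     "FTP": ["tcp/21"],
--     "SMTP": ["tcp/25"],
--     "DNS": ["tcp/53", "udp/53"],
--     "TELNET": ["tcp/23"],
--     "IMAP": ["tcp/143"],
--     "POP3": ["tcp/110"],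
--     "LDAP": ["tcp/389"],
--     "LDAPS": ["tcp/636"],
--     "RDP": ["tcp/3389"],
--     "MYSQL": ["tcp/3306"],
--     "MSSQL": ["tcp/1433"],
--     "ORACLE": ["tcp/1521"],
--     "NTP": ["udp/123"],
--     "SNMP": ["udp/161"],
--     "SYSLOG": ["udp/514"],
--     "RADIUS": ["udp/1812"],
--     "PING": ["icmp/0"],
--     "ICMP": ["icmp/0"],
-- }
--
-- def _resolve_service(
--     name: str,
--     svc_table: dict[str, Any],
--     svcgrp_table: dict[str, Any],
--     _depth: int = 0,
-- ) -> list[str]: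
--     """Resolve a FortiGate service name to list of 'proto/port' strings."""
--     if _depth > 10:
--         return [name]
--     name = name.strip('"').upper()
--     if name in _BUILTIN_SERVICES:
--         return _BUILTIN_SERVICES[name]
--
--     # Service group
--     if name in svcgrp_table:
--         members = svcgrp_table[name].get("member", "").split()
--         result: list[str] = []
--         for m in members:
--             result.extend(_resolve_service(m, svc_table, svcgrp_table, _depth + 1))
--         return result or [name]
--
--     # Custom service
--     if name in svc_table:
--         obj = svc_table[name]
--         proto = obj.get("protocol", "TCP").upper()
--         results: list[str] = []
--         if proto in ("TCP", "TCP/UDP/SCTP"):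
--             tcp_range = obj.get("tcp-portrange", "")
--             for pr in tcp_range.split():
--                 results.append(f"tcp/{pr}")
--         if proto in ("UDP", "TCP/UDP/SCTP"):
--             udp_range = obj.get("udp-portrange", "")
--             for pr in udp_range.split():
--                 results.append(f"udp/{pr}")
--         if proto == "ICMP":
--             results.append("icmp/0")
--         return results or [name.lower()]
--
--     return [name.lower()]
-- ===== SOURCE B (Python) =====
-- # B: iterative DFS with an explicit worklist instead of recursion; same return values as A
-- # (A returns the shared _BUILTIN_SERVICES list object on a direct builtin hit; B returns an equal fresh list).
-- _BUILTIN_SERVICES = {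
--     "ALL": ["ALL"], "ANY": ["ALL"], "HTTP": ["tcp/80"], "HTTPS": ["tcp/443"],
--     "SSH": ["tcp/22"], "FTP": ["tcp/21"], "SMTP": ["tcp/25"], "DNS": ["tcp/53", "udp/53"],
--     "TELNET": ["tcp/23"], "IMAP": ["tcp/143"], "POP3": ["tcp/110"], "LDAP": ["tcp/389"],
--     "LDAPS": ["tcp/636"], "RDP": ["tcp/3389"], "MYSQL": ["tcp/3306"], "MSSQL": ["tcp/1433"],
--     "ORACLE": ["tcp/1521"], "NTP": ["udp/123"], "SNMP": ["udp/161"], "SYSLOG": ["udp/514"],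
--     "RADIUS": ["udp/1812"], "PING": ["icmp/0"], "ICMP": ["icmp/0"],
-- }
--
-- def _resolve_service(name, svc_table, svcgrp_table, _depth=0):
--     out = []
--     stack = [(name, _depth)]
--     while stack:
--         n, d = stack.pop()
--         if d > 10:
--             out.append(n)
--             continue
--         n = n.strip('"').upper()
--         if n in _BUILTIN_SERVICES:
--             out.extend(_BUILTIN_SERVICES[n])
--         elif n in svcgrp_table:
--             members = svcgrp_table[n].get("member", "").split()
--             if members:
--                 for m in reversed(members):
--                     stack.append((m, d + 1))
--             else:
--                 out.append(n)
--         elif n in svc_table: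
--             obj = svc_table[n]
--             proto = obj.get("protocol", "TCP").upper()
--             res = ["tcp/" + pr for pr in obj.get("tcp-portrange", "").split()] \
--                 if proto in ("TCP", "TCP/UDP/SCTP") else []
--             if proto in ("UDP", "TCP/UDP/SCTP"):
--                 res += ["udp/" + pr for pr in obj.get("udp-portrange", "").split()]
--             if proto == "ICMP":
--                 res.append("icmp/0")
--             out.extend(res or [n.lower()])
--         else:
--             out.append(n.lower())
--     return out
-- ===== Notes on version B (the rewrite author's own statement) =====
-- stated objective: alternative
-- what changed: Replaces A's recursive resolution by an iterative depth-first traversal with an explicit worklist stack of (name, depth) entries and a single output accumulator (members are pushed in reverse to keep left-to-right order); the per-group 'result or [name]' fallback becomes an empty-members check, valid because every resolution is non-empty.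
import Mathlib
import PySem

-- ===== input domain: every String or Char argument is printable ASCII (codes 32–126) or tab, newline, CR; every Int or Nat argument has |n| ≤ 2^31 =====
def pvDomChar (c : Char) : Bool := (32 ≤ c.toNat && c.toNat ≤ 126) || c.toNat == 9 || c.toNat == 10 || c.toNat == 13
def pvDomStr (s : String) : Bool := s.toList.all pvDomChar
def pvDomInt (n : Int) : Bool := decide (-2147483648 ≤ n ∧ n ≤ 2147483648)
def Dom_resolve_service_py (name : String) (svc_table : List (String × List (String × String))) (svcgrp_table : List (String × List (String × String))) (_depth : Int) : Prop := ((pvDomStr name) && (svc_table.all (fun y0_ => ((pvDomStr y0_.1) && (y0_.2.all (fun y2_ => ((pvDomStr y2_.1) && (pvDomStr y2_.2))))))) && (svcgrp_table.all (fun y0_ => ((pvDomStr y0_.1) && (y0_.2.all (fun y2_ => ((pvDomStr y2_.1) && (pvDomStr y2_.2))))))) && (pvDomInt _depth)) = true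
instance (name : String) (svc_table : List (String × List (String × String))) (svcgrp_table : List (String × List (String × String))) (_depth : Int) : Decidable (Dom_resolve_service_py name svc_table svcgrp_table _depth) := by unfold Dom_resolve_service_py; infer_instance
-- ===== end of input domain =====

-- termination helper for A's recursion (kept as a named lemma so the proof term stays small)
theorem pvDepth_dec (d : Int) (h : ¬ d > 10) : (11 - (d + 1)).toNat < (11 - d).toNat := by omega

-- B replaces A's recursion by an explicit worklist (stack) DFS with an output accumulator; same return
-- values (note: on a direct builtin hit Python A returns the shared _BUILTIN_SERVICES list object, B an equal fresh list).

-- ===== PORT A =====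
-- the module-level _BUILTIN_SERVICES dict (shared context of both programs)
def pvBuiltin : PySem.Dict String (List String) := PySem.Dict.mk
  [("ALL", ["ALL"]), ("ANY", ["ALL"]), ("HTTP", ["tcp/80"]), ("HTTPS", ["tcp/443"]),
   ("SSH", ["tcp/22"]), ("FTP", ["tcp/21"]), ("SMTP", ["tcp/25"]), ("DNS", ["tcp/53", "udp/53"]),
   ("TELNET", ["tcp/23"]), ("IMAP", ["tcp/143"]), ("POP3", ["tcp/110"]), ("LDAP", ["tcp/389"]),
   ("LDAPS", ["tcp/636"]), ("RDP", ["tcp/3389"]), ("MYSQL", ["tcp/3306"]), ("MSSQL", ["tcp/1433"]),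
   ("ORACLE", ["tcp/1521"]), ("NTP", ["udp/123"]), ("SNMP", ["udp/161"]), ("SYSLOG", ["udp/514"]),
   ("RADIUS", ["udp/1812"]), ("PING", ["icmp/0"]), ("ICMP", ["icmp/0"])]

-- name.strip('"').upper()  (shared by both ports: both Pythons contain this exact expression)
def pvStripUpper (s : String) : String := PySem.Str.upper (PySem.Str.stripChars s "\"")

-- svcgrp_table[n2].get("member", "").split()  (the member-token list of a group; shared lookup expression)
def pvMemberTokens (svcgrp_table : List (String × List (String × String))) (n2 : String) : List String :=
  PySem.Str.split₀ (PySem.Dict.getD (PySem.Dict.mk ((PySem.Dict.mk svcgrp_table).getD n2 [])) "member" "")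

-- A's custom-service block, verbatim: builds `results` by appending f-strings in loops, then `results or [name.lower()]`
def pvCustomA (svc_table : List (String × List (String × String))) (n2 : String) : List String :=
  let obj := PySem.Dict.mk ((PySem.Dict.mk svc_table).getD n2 [])
  let proto := PySem.Str.upper (PySem.Dict.getD obj "protocol" "TCP")
  let results : List String := []
  let results := if proto = "TCP" ∨ proto = "TCP/UDP/SCTP" then
      (PySem.Str.split₀ (PySem.Dict.getD obj "tcp-portrange" "")).foldl
        (fun acc pr => acc ++ ["tcp/" ++ pr]) results
    else results
  let results := if proto = "UDP" ∨ proto = "TCP/UDP/SCTP" then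
      (PySem.Str.split₀ (PySem.Dict.getD obj "udp-portrange" "")).foldl
        (fun acc pr => acc ++ ["udp/" ++ pr]) results
    else results
  let results := if proto = "ICMP" then results ++ ["icmp/0"] else results
  if results = [] then [PySem.Str.lower n2] else results

-- 'name in table' / 'table[name]' is ported as Dict.contains / Dict.getD (the lookup is guarded by the contains test)
def resolve_service_py (name : String) (svc_table : List (String × List (String × String))) (svcgrp_table : List (String × List (String × String))) (_depth : Int) : List String :=
  if _depth > 10 then [name]
  else
    let name2 := pvStripUpper name
    if pvBuiltin.contains name2 then pvBuiltin.getD name2 []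
    else if (PySem.Dict.mk svcgrp_table).contains name2 then
      let members := pvMemberTokens svcgrp_table name2
      let result := members.foldl (fun acc m => acc ++ resolve_service_py m svc_table svcgrp_table (_depth + 1)) []
      if result = [] then [name2] else result
    else if (PySem.Dict.mk svc_table).contains name2 then pvCustomA svc_table name2
    else [PySem.Str.lower name2]
termination_by (11 - _depth).toNat
decreasing_by exact pvDepth_dec _depth ‹_›

-- ===== PORT B =====
-- termination bound for the worklist loop: 2 + total number of member tokens of all groups
def pvGrpFuel (svcgrp_table : List (String × List (String × String))) : Nat :=
  2 + (svcgrp_table.map (fun p => (PySem.Str.split₀ (PySem.Dict.getD (PySem.Dict.mk p.2) "member" "")).length)).sum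

theorem pvDict_contains_getD {ν : Type} (l : List (String × ν)) (k : String) (dflt : ν)
    (h : (PySem.Dict.mk l).contains k = true) : ∃ p ∈ l, (PySem.Dict.mk l).getD k dflt = p.2 := by
  simp only [PySem.Dict.contains, List.any_eq_true] at h
  have hs : (l.find? (fun p => p.1 == k)).isSome := List.find?_isSome.mpr h
  obtain ⟨q, hq⟩ := Option.isSome_iff_exists.mp hs
  exact ⟨q, List.mem_of_find?_eq_some hq, by simp [PySem.Dict.getD, PySem.Dict.get?, hq]⟩

theorem pvGrpFuel_bound (svcgrp_table : List (String × List (String × String))) (n : String)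
    (h : (PySem.Dict.mk svcgrp_table).contains n = true) :
    (pvMemberTokens svcgrp_table n).length + 2 ≤ pvGrpFuel svcgrp_table := by
  obtain ⟨p, hp, he⟩ := pvDict_contains_getD svcgrp_table n [] h
  unfold pvMemberTokens
  rw [he]
  have hmem : (PySem.Str.split₀ (PySem.Dict.getD (PySem.Dict.mk p.2) "member" "")).length ∈
      (svcgrp_table.map (fun p => (PySem.Str.split₀ (PySem.Dict.getD (PySem.Dict.mk p.2) "member" "")).length)) :=
    List.mem_map_of_mem hp
  have hle := List.le_sum_of_mem hmem
  unfold pvGrpFuel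
  omega

-- B's custom-service block: comprehensions (maps) instead of A's appending loops, then `res or [n.lower()]`
def pvCustomB (svc_table : List (String × List (String × String))) (n2 : String) : List String :=
  let obj := PySem.Dict.mk ((PySem.Dict.mk svc_table).getD n2 [])
  let proto := PySem.Str.upper (PySem.Dict.getD obj "protocol" "TCP")
  let res := if proto = "TCP" ∨ proto = "TCP/UDP/SCTP" then
      (PySem.Str.split₀ (PySem.Dict.getD obj "tcp-portrange" "")).map (fun pr => "tcp/" ++ pr)
    else []
  let res := if proto = "UDP" ∨ proto = "TCP/UDP/SCTP" then
      res ++ (PySem.Str.split₀ (PySem.Dict.getD obj "udp-portrange" "")).map (fun pr => "udp/" ++ pr)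
    else res
  let res := if proto = "ICMP" then res ++ ["icmp/0"] else res
  if res = [] then [PySem.Str.lower n2] else res

-- termination helpers for the worklist loop (named lemmas so the recursion's proof terms stay small)
theorem pvMeas_pop (svcgrp_table : List (String × List (String × String))) (n : String) (d : Int) (rest : List (String × Int)) :
    (rest.map (fun e => pvGrpFuel svcgrp_table ^ (12 - e.2).toNat)).sum
      < (((n, d) :: rest).map (fun e => pvGrpFuel svcgrp_table ^ (12 - e.2).toNat)).sum := by
  simp only [List.map_cons, List.sum_cons]
  have h1 : 0 < pvGrpFuel svcgrp_table ^ (12 - d).toNat := Nat.pow_pos (by unfold pvGrpFuel; omega)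
  omega

theorem pvMeas_push (svcgrp_table : List (String × List (String × String))) (n : String) (d : Int) (rest : List (String × Int))
    (hd : ¬ d > 10) {members : List String} (hb : members.length + 2 ≤ pvGrpFuel svcgrp_table) (hm : members ≠ []) :
    ((members.map (fun m => (m, d + 1)) ++ rest).map (fun e => pvGrpFuel svcgrp_table ^ (12 - e.2).toNat)).sum
      < (((n, d) :: rest).map (fun e => pvGrpFuel svcgrp_table ^ (12 - e.2).toNat)).sum := by
  simp only [List.map_cons, List.sum_cons, List.map_append, List.map_map, List.sum_append]
  have he : (12 - d).toNat = (12 - (d + 1)).toNat + 1 := by omega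
  have hconst : (members.map ((fun e => pvGrpFuel svcgrp_table ^ (12 - e.2).toNat) ∘ (fun m => (m, d + 1)))).sum
      = members.length * pvGrpFuel svcgrp_table ^ (12 - (d + 1)).toNat := by
    simp only [Function.comp_def, List.map_const', List.sum_replicate, smul_eq_mul]
  have hFpos : 0 < pvGrpFuel svcgrp_table ^ (12 - (d + 1)).toNat := Nat.pow_pos (by unfold pvGrpFuel; omega)
  have key : members.length * pvGrpFuel svcgrp_table ^ (12 - (d + 1)).toNat
      < pvGrpFuel svcgrp_table ^ (12 - (d + 1)).toNat * pvGrpFuel svcgrp_table := by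
    calc members.length * pvGrpFuel svcgrp_table ^ (12 - (d + 1)).toNat
        < pvGrpFuel svcgrp_table * pvGrpFuel svcgrp_table ^ (12 - (d + 1)).toNat :=
          mul_lt_mul_of_pos_right (by omega) hFpos
      _ = _ := Nat.mul_comm _ _
  rw [hconst, he, pow_succ]
  linarith

-- the while-loop over the explicit stack; Python pushes the members reversed and pops from the end,
-- which with a Lean list whose head is the top of the stack is prepending the members in order
def resolve_service_py_alt_go (svc_table : List (String × List (String × String))) (svcgrp_table : List (String × List (String × String))) (stack : List (String × Int)) (out : List String) : List String :=
  match stack with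
  | [] => out
  | (n, d) :: rest =>
    if d > 10 then resolve_service_py_alt_go svc_table svcgrp_table rest (out ++ [n])
    else
      let n2 := pvStripUpper n
      if pvBuiltin.contains n2 then
        resolve_service_py_alt_go svc_table svcgrp_table rest (out ++ pvBuiltin.getD n2 [])
      else if hg : (PySem.Dict.mk svcgrp_table).contains n2 then
        let members := pvMemberTokens svcgrp_table n2
        if members = [] then resolve_service_py_alt_go svc_table svcgrp_table rest (out ++ [n2])
        else resolve_service_py_alt_go svc_table svcgrp_table (members.map (fun m => (m, d + 1)) ++ rest) out
      else if (PySem.Dict.mk svc_table).contains n2 then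
        resolve_service_py_alt_go svc_table svcgrp_table rest (out ++ pvCustomB svc_table n2)
      else resolve_service_py_alt_go svc_table svcgrp_table rest (out ++ [PySem.Str.lower n2])
termination_by (stack.map (fun e => pvGrpFuel svcgrp_table ^ (12 - e.2).toNat)).sum
decreasing_by
  · exact pvMeas_pop svcgrp_table n d rest
  · exact pvMeas_pop svcgrp_table n d rest
  · exact pvMeas_pop svcgrp_table n d rest
  · exact pvMeas_push svcgrp_table n d rest ‹_› (pvGrpFuel_bound svcgrp_table n2 hg) ‹_›
  · exact pvMeas_pop svcgrp_table n d rest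
  · exact pvMeas_pop svcgrp_table n d rest

def resolve_service_py_alt (name : String) (svc_table : List (String × List (String × String))) (svcgrp_table : List (String × List (String × String))) (_depth : Int) : List String :=
  resolve_service_py_alt_go svc_table svcgrp_table [(name, _depth)] []

-- ===== PRECONDITION & SPEC =====
-- Pre_ excludes only inputs where very negative _depth meets a group table whose member tokens name groups:
-- there Python A's recursion can exceed the interpreter recursion limit (RecursionError) and the expansion
-- may blow up; A still returns on some excluded inputs (see the cited example, where B returns the same value).
def Pre_resolve_service_py (name : String) (svc_table : List (String × List (String × String))) (svcgrp_table : List (String × List (String × String))) (_depth : Int) : Prop :=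
  -900 ≤ _depth ∨
  ∀ p ∈ svcgrp_table, ∀ m ∈ PySem.Str.split₀ (PySem.Dict.getD (PySem.Dict.mk p.2) "member" ""),
    (PySem.Dict.mk svcgrp_table).contains (PySem.Str.upper (PySem.Str.stripChars m "\"")) = false
instance (name : String) (svc_table : List (String × List (String × String))) (svcgrp_table : List (String × List (String × String))) (_depth : Int) : Decidable (Pre_resolve_service_py name svc_table svcgrp_table _depth) := by unfold Pre_resolve_service_py; infer_instance

def pvWitness_resolve_service_py : String × (List (String × List (String × String))) × (List (String × List (String × String))) × Int :=
  ("grp1", [("SVC1", [("protocol", "TCP"), ("tcp-portrange", "80 443")])], [("GRP1", [("member", "svc1 \"HTTP\" foo")])], 0)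

def Spec_resolve_service_py (name : String) (svc_table : List (String × List (String × String))) (svcgrp_table : List (String × List (String × String))) (_depth : Int) (out : List String) : Prop := out = resolve_service_py_alt name svc_table svcgrp_table _depth
instance (name : String) (svc_table : List (String × List (String × String))) (svcgrp_table : List (String × List (String × String))) (_depth : Int) (out : List String) : Decidable (Spec_resolve_service_py name svc_table svcgrp_table _depth out) := by unfold Spec_resolve_service_py; infer_instance

-- ===== CLAIM (what is proved, stated in full; the proofs are below) =====
def Claim_equal_resolve_service_py : Prop := ∀ (name : String) (svc_table : List (String × List (String × String))) (svcgrp_table : List (String × List (String × String))) (_depth : Int), Dom_resolve_service_py name svc_table svcgrp_table _depth → Pre_resolve_service_py name svc_table svcgrp_table _depth → Spec_resolve_service_py name svc_table svcgrp_table _depth (resolve_service_py name svc_table svcgrp_table _depth)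

-- ===== LEMMAS AND PROOFS =====

theorem ite_nil_ne_nil (X : List String) (y : String) : (if X = [] then [y] else X) ≠ [] := by
  split <;> simp_all

theorem pvBuiltin_getD_ne_nil (x : String) (h : pvBuiltin.contains x = true) : pvBuiltin.getD x [] ≠ [] := by
  obtain ⟨p, hp, he⟩ := pvDict_contains_getD _ x [] h
  have hall : ∀ q ∈ pvBuiltin.items, q.2 ≠ ([] : List String) := by decide
  unfold pvBuiltin
  rw [he]
  exact hall p hp

theorem pvCustomA_ne_nil (svc_table : List (String × List (String × String))) (n2 : String) :
    pvCustomA svc_table n2 ≠ [] := by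
  unfold pvCustomA
  exact ite_nil_ne_nil _ _

theorem pvCustom_eq (svc_table : List (String × List (String × String))) (n2 : String) :
    pvCustomA svc_table n2 = pvCustomB svc_table n2 := by
  unfold pvCustomA pvCustomB
  simp only [PySem.List.foldl_append_singleton_eq_map, List.nil_append]

theorem resolve_ne_nil (name : String) (svc_table svcgrp_table : List (String × List (String × String))) (_depth : Int) :
    resolve_service_py name svc_table svcgrp_table _depth ≠ [] := by
  rw [resolve_service_py]
  dsimp only [letFun]
  split
  · simp
  · split
    · exact pvBuiltin_getD_ne_nil _ (by assumption)
    · split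
      · exact ite_nil_ne_nil _ _
      · split
        · exact pvCustomA_ne_nil _ _
        · simp

theorem flatMap_resolve_ne_nil (svc_table svcgrp_table : List (String × List (String × String))) (members : List String) (d : Int) (h : members ≠ []) :
    members.flatMap (fun m => resolve_service_py m svc_table svcgrp_table d) ≠ [] := by
  cases members with
  | nil => simp at h
  | cons m ms =>
    simp only [List.flatMap_cons, ne_eq, List.append_eq_nil_iff, not_and]
    intro hc
    exact absurd hc (resolve_ne_nil m svc_table svcgrp_table d)

theorem go_spec (svc_table svcgrp_table : List (String × List (String × String))) (stack : List (String × Int)) (out : List String) :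
    resolve_service_py_alt_go svc_table svcgrp_table stack out
      = out ++ (stack.map (fun e => resolve_service_py e.1 svc_table svcgrp_table e.2)).flatten := by
  fun_induction resolve_service_py_alt_go svc_table svcgrp_table stack out
  case case1 => simp
  case case2 =>
    rename_i out n d rest h ih
    rw [ih, List.map_cons, List.flatten_cons,
      show resolve_service_py n svc_table svcgrp_table d = [n] from by rw [resolve_service_py]; simp [h]]
    simp [List.append_assoc]
  case case3 =>
    rename_i out n d rest h1 n2 h2 ih
    rw [ih, List.map_cons, List.flatten_cons]
    conv_rhs => rw [resolve_service_py]
    dsimp only [letFun]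
    rw [if_neg h1, if_pos (show pvBuiltin.contains (pvStripUpper n) = true from h2)]
    simp only [List.append_assoc]
    rfl
  case case4 =>
    rename_i out n d rest h1 n2 h2 h3 members hm ih
    rw [ih, List.map_cons, List.flatten_cons]
    conv_rhs => rw [resolve_service_py]
    dsimp only [letFun]
    rw [if_neg h1, if_neg (show ¬ pvBuiltin.contains (pvStripUpper n) = true from h2),
      if_pos (show (PySem.Dict.mk svcgrp_table).contains (pvStripUpper n) = true from h3),
      show pvMemberTokens svcgrp_table (pvStripUpper n) = [] from hm]
    simp only [List.foldl_nil, if_pos, List.append_assoc]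
    rfl
  case case5 =>
    rename_i out n d rest h1 n2 h2 h3 members hm ih
    rw [ih]
    simp only [List.map_append, List.map_map, List.flatten_append, List.map_cons, List.flatten_cons]
    conv_rhs => rw [resolve_service_py]
    dsimp only [letFun]
    rw [if_neg h1, if_neg (show ¬ pvBuiltin.contains (pvStripUpper n) = true from h2),
      if_pos (show (PySem.Dict.mk svcgrp_table).contains (pvStripUpper n) = true from h3),
      PySem.List.foldl_append_eq_flatMap, List.nil_append,
      if_neg (flatMap_resolve_ne_nil svc_table svcgrp_table (pvMemberTokens svcgrp_table (pvStripUpper n)) (d + 1) hm)]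
    simp only [Function.comp_def, List.flatMap_def]
    rfl
  case case6 =>
    rename_i out n d rest h1 n2 h2 h3 h4 ih
    rw [ih, List.map_cons, List.flatten_cons]
    conv_rhs => rw [resolve_service_py]
    dsimp only [letFun]
    rw [if_neg h1, if_neg (show ¬ pvBuiltin.contains (pvStripUpper n) = true from h2),
      if_neg (show ¬ (PySem.Dict.mk svcgrp_table).contains (pvStripUpper n) = true from h3),
      if_pos (show (PySem.Dict.mk svc_table).contains (pvStripUpper n) = true from h4),
      pvCustom_eq]
    simp only [List.append_assoc]
    rfl
  case case7 =>
    rename_i out n d rest h1 n2 h2 h3 h4 ih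
    rw [ih, List.map_cons, List.flatten_cons]
    conv_rhs => rw [resolve_service_py]
    dsimp only [letFun]
    rw [if_neg h1, if_neg (show ¬ pvBuiltin.contains (pvStripUpper n) = true from h2),
      if_neg (show ¬ (PySem.Dict.mk svcgrp_table).contains (pvStripUpper n) = true from h3),
      if_neg (show ¬ (PySem.Dict.mk svc_table).contains (pvStripUpper n) = true from h4)]
    simp only [List.append_assoc]
    rfl

-- ===== VERDICT (by name: the statement is the Claim_ definition above) =====
theorem resolve_service_py_spec : Claim_equal_resolve_service_py := by
  intro name svc_table svcgrp_table _depth _ _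
  unfold Spec_resolve_service_py resolve_service_py_alt
  rw [go_spec]
  simp
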